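-- pv_equiv track=rewrite | github.com/KEUMIN/algorithm_2024 | hashtable/pick_oranges.py | solution
-- ===== SOURCE A (Python) =====
-- from collections import defaultdict
--
-- def solution(k, tangerine):
--     t_dict = defaultdict(int)
--     for t in tangerine:
--         t_dict[t] += 1
--
--     t_list = []
--     for key, value in t_dict.items():
--         t_list.append((key, value))
--
--     answer = 0
--     to_pick = k
--
--     for t in sorted(t_list, key=lambda x: x[1], reverse=True):
--         answer += 1
--         if to_pick <= t[1]:
--             return answer
--         to_pick -= t[1]
-- ===== SOURCE B (Python) =====
-- def solution(k, tangerine):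
--     # Bucket the tangerine-size frequencies and walk the buckets high-to-low:
--     # no comparison sort is performed.
--     freq = {}
--     for t in tangerine:
--         freq[t] = freq.get(t, 0) + 1
--     buckets = {}
--     for c in freq.values():
--         buckets[c] = buckets.get(c, 0) + 1
--     answer = 0
--     remaining = k
--     for c in range(len(tangerine), 0, -1):
--         for _ in range(buckets.get(c, 0)):
--             answer += 1
--             if remaining <= c:
--                 return answer
--             remaining -= c
-- ===== Notes on version B (the rewrite author's own statement) =====
-- stated objective: alternative
-- what changed: Replaces A's comparison sort of the (type, count) pairs with frequency buckets (count -> how many types have that count) walked from the highest possible count down to 1, so no sort is performed; measured runtime is the same, dominated by the counting pass both share.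
-- outside the precondition, e.g. on solution(5, [1, 2]): A returns None, B returns None
import Mathlib
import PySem

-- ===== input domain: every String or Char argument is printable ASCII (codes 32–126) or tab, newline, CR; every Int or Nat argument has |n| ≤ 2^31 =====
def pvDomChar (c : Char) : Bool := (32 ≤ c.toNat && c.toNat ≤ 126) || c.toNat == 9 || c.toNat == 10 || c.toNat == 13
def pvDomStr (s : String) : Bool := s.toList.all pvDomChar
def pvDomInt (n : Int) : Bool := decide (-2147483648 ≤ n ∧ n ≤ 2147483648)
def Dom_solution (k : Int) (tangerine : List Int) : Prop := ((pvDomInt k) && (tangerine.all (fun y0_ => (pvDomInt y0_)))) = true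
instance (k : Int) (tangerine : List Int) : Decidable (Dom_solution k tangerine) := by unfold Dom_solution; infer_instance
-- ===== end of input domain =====

-- B replaces A's comparison sort of the (type, count) pairs by frequency buckets walked
-- from the highest possible count down to 1 (objective: alternative — no sort is performed).
-- A returns Python None (no int) when the list is empty or k exceeds the total number of
-- tangerines; those inputs are outside Pre_ below, and the ports return 0 there.

-- ===== PORT A =====
-- A's early-return loop over the sorted (key, count) pairs; none = Python's implicit None
def solLoopA : List (Int × Int) → Int → Int → Option Int
  | [], _, _ => none
  | t :: rest, answer, toPick =>
    let answer := answer + 1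
    if toPick ≤ t.2 then some answer
    else solLoopA rest answer (toPick - t.2)

def solution (k : Int) (tangerine : List Int) : Int :=
  let tDict : PySem.Dict Int Int :=
    tangerine.foldl (fun d t => d.modify t 0 (· + 1)) PySem.Dict.empty
  let tList : List (Int × Int) :=
    tDict.items.foldl (fun acc kv => acc ++ [kv]) []
  (solLoopA (PySem.List.sorted tList (fun x => x.2) true) 0 k).getD 0

-- ===== PORT B =====
-- B's inner loop "for _ in range(m)": returns (some r, _, _) on return, else the updated state
def solInnerB (c : Int) : Nat → Int → Int → Option Int × Int × Int
  | 0, answer, remaining => (none, answer, remaining)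
  | m + 1, answer, remaining =>
    let answer := answer + 1
    if remaining ≤ c then (some answer, answer, remaining)
    else solInnerB c m answer (remaining - c)

-- B's outer loop "for c in range(len(tangerine), 0, -1)"
def solOuterB (buckets : PySem.Dict Int Int) : List Int → Int → Int → Option Int
  | [], _, _ => none
  | c :: cs, answer, remaining =>
    match solInnerB c (buckets.getD c 0).toNat answer remaining with
    | (some r, _, _) => some r
    | (none, a, r) => solOuterB buckets cs a r

def solution_alt (k : Int) (tangerine : List Int) : Int :=
  let freq : PySem.Dict Int Int :=
    tangerine.foldl (fun d t => d.insert t (d.getD t 0 + 1)) PySem.Dict.empty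
  let buckets : PySem.Dict Int Int :=
    freq.values.foldl (fun d c => d.insert c (d.getD c 0 + 1)) PySem.Dict.empty
  (solOuterB buckets (PySem.List.pyRange (tangerine.length : Int) 0 (-1)) 0 k).getD 0

-- ===== PRECONDITION & SPEC =====
-- Pre_ excludes empty lists and k larger than the total number of tangerines: there the
-- Python A falls off its loop and returns None, which is not an int.
def Pre_solution (k : Int) (tangerine : List Int) : Prop :=
  tangerine ≠ [] ∧ k ≤ (tangerine.length : Int)
instance (k : Int) (tangerine : List Int) : Decidable (Pre_solution k tangerine) := by
  unfold Pre_solution; infer_instance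

def pvWitness_solution : Int × List Int := (2, [1, 1, 2])

def Spec_solution (k : Int) (tangerine : List Int) (out : Int) : Prop := out = solution_alt k tangerine
instance (k : Int) (tangerine : List Int) (out : Int) : Decidable (Spec_solution k tangerine out) := by unfold Spec_solution; infer_instance

-- ===== CLAIM (what is proved, stated in full; the proofs are below) =====
def Claim_equal_solution : Prop := ∀ (k : Int) (tangerine : List Int), Dom_solution k tangerine → Pre_solution k tangerine → Spec_solution k tangerine (solution k tangerine)

-- ===== LEMMAS AND PROOFS =====

-- the common core: walk a list of counts, stopping when `rem` is covered
def pickLoop : List Int → Int → Int → Option Int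
  | [], _, _ => none
  | c :: cs, answer, rem => if rem ≤ c then some (answer + 1) else pickLoop cs (answer + 1) (rem - c)

theorem solLoopA_eq_pickLoop (l : List (Int × Int)) (a p : Int) :
    solLoopA l a p = pickLoop (l.map (·.2)) a p := by
  induction l generalizing a p with
  | nil => rfl
  | cons t rest ih => simp [solLoopA, pickLoop, ih]

theorem pickLoop_replicate_append (c : Int) (m : Nat) (rest : List Int) (a r : Int) :
    pickLoop (List.replicate m c ++ rest) a r =
      (match solInnerB c m a r with
       | (some v, _, _) => some v
       | (none, a', r') => pickLoop rest a' r') := by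
  induction m generalizing a r with
  | zero => rfl
  | succ m ih =>
    simp only [List.replicate_succ, List.cons_append, pickLoop, solInnerB]
    by_cases h : r ≤ c
    · simp [h]
    · simp [h, ih]

theorem solOuterB_eq_pickLoop (buckets : PySem.Dict Int Int) (cs : List Int) (a r : Int) :
    solOuterB buckets cs a r =
      pickLoop (cs.flatMap fun c => List.replicate (buckets.getD c 0).toNat c) a r := by
  induction cs generalizing a r with
  | nil => rfl
  | cons c cs ih =>
    simp only [solOuterB, List.flatMap_cons, pickLoop_replicate_append]
    cases h : solInnerB c (buckets.getD c 0).toNat a r with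
    | mk o s =>
      cases o with
      | some v => simp
      | none => simp [ih]

theorem sum_map_ite_count {x : Int} (cs : List Int) (m : Int → Nat) (h : cs.Nodup) :
    (cs.map fun c => if x = c then m c else 0).sum = if x ∈ cs then m x else 0 := by
  induction cs with
  | nil => simp
  | cons c cs ih =>
    simp only [List.nodup_cons] at h
    by_cases hx : x = c
    · subst hx
      simp [List.map_cons, ih h.2, h.1]
    · simp [List.map_cons, hx, ih h.2]

theorem flatMap_replicate_perm (cs vs : List Int) (hnd : cs.Nodup)
    (hmem : ∀ v ∈ vs, v ∈ cs) :
    (cs.flatMap fun c => List.replicate (vs.count c) c).Perm vs := by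
  rw [List.perm_iff_count]
  intro x
  rw [List.count_flatMap]
  have : (List.map (List.count x ∘ fun c => List.replicate (vs.count c) c) cs).sum
      = (cs.map fun c => if x = c then vs.count c else 0).sum := by
    apply congrArg
    apply List.map_congr_left
    intro c _
    simp only [Function.comp_apply]
    rw [List.count_replicate]
    simp only [beq_iff_eq]
    by_cases h : x = c
    · simp [h]
    · simp [h, Ne.symm h]
  rw [this, sum_map_ite_count cs _ hnd]
  by_cases hx : x ∈ cs
  · simp [hx]
  · simp [hx]
    exact (List.count_eq_zero.mpr fun hv => hx (hmem x hv)).symm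

theorem flatMap_replicate_pairwise (cs : List Int) (m : Int → Nat)
    (h : cs.Pairwise (· > ·)) :
    (cs.flatMap fun c => List.replicate (m c) c).Pairwise (· ≥ ·) := by
  induction cs with
  | nil => simp
  | cons c cs ih =>
    rw [List.pairwise_cons] at h
    rw [List.flatMap_cons, List.pairwise_append]
    refine ⟨List.pairwise_replicate.mpr (Or.inr le_rfl), ih h.2, ?_⟩
    intro a ha b hb
    rw [List.eq_of_mem_replicate ha]
    rw [List.mem_flatMap] at hb
    obtain ⟨c', hc', hb⟩ := hb
    rw [List.eq_of_mem_replicate hb]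
    exact le_of_lt (h.1 c' hc')

theorem pyRange_down_pairwise (n : Int) :
    (PySem.List.pyRange n 0 (-1)).Pairwise (· > ·) := by
  rw [PySem.List.pyRange_neg_one_eq_reverse]
  rw [List.pairwise_reverse]
  rw [PySem.List.pyRange_of_pos (0 + 1) (n + 1) (by norm_num : (0:Int) < 1)]
  rw [List.pairwise_map]
  apply List.pairwise_lt_range.imp
  intro i j hij
  omega

theorem counts_eq (tangerine : List Int) :
    ((PySem.List.sorted ((PySem.Dict.counter tangerine).items) (fun x => x.2) true).map (·.2))
      = (PySem.List.pyRange (tangerine.length : Int) 0 (-1)).flatMap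
          (fun c => List.replicate (((PySem.Dict.counter tangerine).values).count c) c) := by
  have hvals : (PySem.Dict.counter tangerine).values
      = ((PySem.Dict.counter tangerine).items).map (·.2) := rfl
  have hpA : (((PySem.List.sorted ((PySem.Dict.counter tangerine).items) (fun x => x.2) true).map (·.2))).Pairwise (· ≥ ·) := by
    rw [List.pairwise_map]
    exact PySem.List.sorted_pairwise_rev _ _
  have hpB : ((PySem.List.pyRange (tangerine.length : Int) 0 (-1)).flatMap
      (fun c => List.replicate (((PySem.Dict.counter tangerine).values).count c) c)).Pairwise (· ≥ ·) :=
    flatMap_replicate_pairwise _ _ (pyRange_down_pairwise _)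
  have hpermA : (((PySem.List.sorted ((PySem.Dict.counter tangerine).items) (fun x => x.2) true).map (·.2))).Perm
      ((PySem.Dict.counter tangerine).values) := by
    rw [hvals]
    exact (PySem.List.sorted_perm _ _ _).map _
  have hmem : ∀ v ∈ (PySem.Dict.counter tangerine).values,
      v ∈ PySem.List.pyRange (tangerine.length : Int) 0 (-1) := by
    intro v hv
    rw [PySem.List.mem_pyRange_neg_one]
    rw [hvals, PySem.Dict.items_counter, List.map_map] at hv
    obtain ⟨t, ht, rfl⟩ := List.mem_map.mp hv
    have htm : t ∈ tangerine := (PySem.List.mem_dedup tangerine t).mp ht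
    have h1 : 0 < tangerine.count t := List.count_pos_iff.mpr htm
    have h2 : tangerine.count t ≤ tangerine.length := List.count_le_length
    simp only [Function.comp_apply]
    constructor
    · exact_mod_cast h1
    · exact_mod_cast h2
  have hpermB : ((PySem.List.pyRange (tangerine.length : Int) 0 (-1)).flatMap
      (fun c => List.replicate (((PySem.Dict.counter tangerine).values).count c) c)).Perm
      ((PySem.Dict.counter tangerine).values) :=
    flatMap_replicate_perm _ _
      ((pyRange_down_pairwise _).imp fun h => ne_of_gt h) hmem
  exact List.Perm.eq_of_pairwise (fun a b _ _ h1 h2 => le_antisymm h2 h1) hpA hpB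
    (hpermA.trans hpermB.symm)

-- ===== VERDICT (by name: the statement is the Claim_ definition above) =====
theorem solution_spec : Claim_equal_solution := by
  intro k tangerine _ _
  show solution k tangerine = solution_alt k tangerine
  have hA : solution k tangerine =
      (pickLoop ((PySem.List.sorted ((PySem.Dict.counter tangerine).items) (fun x => x.2) true).map (·.2)) 0 k).getD 0 := by
    unfold solution
    dsimp only
    rw [← PySem.Dict.counter_eq_foldl, PySem.List.foldl_append_singleton, List.nil_append,
      solLoopA_eq_pickLoop]
  have hB : solution_alt k tangerine =
      (pickLoop ((PySem.List.pyRange (tangerine.length : Int) 0 (-1)).flatMap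
        (fun c => List.replicate (((PySem.Dict.counter tangerine).values).count c) c)) 0 k).getD 0 := by
    unfold solution_alt
    dsimp only
    rw [PySem.Dict.foldl_insert_getD_add_one_eq_counter,
      PySem.Dict.foldl_insert_getD_add_one_eq_counter, solOuterB_eq_pickLoop]
    congr 1
    refine congrArg (fun l => pickLoop l 0 k) (List.flatMap_congr ?_)
    intro c _
    rw [PySem.Dict.getD_counter]
    simp
  rw [hA, hB, counts_eq]
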